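-- pv_equiv track=rewrite | github.com/timbwfox/calculator-behave | features/steps/calculator_steps.py | parse_button_sequence
-- ===== SOURCE A (Python) =====
-- def parse_button_sequence(sequence):
--     """Parse button sequence string, treating '+/-' as a single token."""
--     buttons = []
--     i = 0
--     while i < len(sequence):
--         if sequence[i:i + 3] == "+/-":
--             buttons.append("+/-")
--             i += 3
--         else:
--             buttons.append(sequence[i])
--             i += 1
--     return buttons
-- ===== SOURCE B (Python) =====
-- def parse_button_sequence(sequence):
--     """Parse button sequence string, treating '+/-' as a single token."""
--     parts = sequence.split("+/-")
--     tokens = list(parts[0])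
--     for part in parts[1:]:
--         tokens.append("+/-")
--         tokens.extend(part)
--     return tokens
-- ===== Notes on version B (the rewrite author's own statement) =====
-- stated objective: idiomatic
-- what changed: Replaces the manual index-scanning while loop (which builds a 3-character slice at every position) with a single str.split on the separator followed by interleaving the separator token between the character-expanded segments.
import Mathlib
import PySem

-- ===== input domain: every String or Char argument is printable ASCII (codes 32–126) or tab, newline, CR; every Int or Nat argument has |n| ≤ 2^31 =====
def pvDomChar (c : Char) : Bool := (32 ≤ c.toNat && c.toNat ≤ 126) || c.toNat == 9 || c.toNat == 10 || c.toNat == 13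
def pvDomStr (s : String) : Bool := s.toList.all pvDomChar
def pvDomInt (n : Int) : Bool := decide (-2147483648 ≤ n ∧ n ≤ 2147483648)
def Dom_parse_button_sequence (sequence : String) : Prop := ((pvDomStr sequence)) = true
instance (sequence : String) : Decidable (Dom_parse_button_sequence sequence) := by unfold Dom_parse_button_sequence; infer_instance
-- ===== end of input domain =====

-- B replaces A's index-by-index while loop with a single str.split("+/-") followed by
-- interleaving the "+/-" token between character-expanded segments (objective: idiomatic).

-- ===== PORT A =====
-- A's while loop, as structural recursion over the remaining suffix of the character list:
-- sequence[i:i+3] == "+/-" becomes a [0:3] slice of the current suffix.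
def parseButtonsA (cs : List Char) : List String :=
  match cs with
  | [] => []
  | c :: rest =>
    if PySem.List.slice (c :: rest) (some 0) (some 3) = ['+', '/', '-'] then
      "+/-" :: parseButtonsA ((c :: rest).drop 3)
    else
      c.toString :: parseButtonsA rest
termination_by cs.length
decreasing_by all_goals simp

def parse_button_sequence (sequence : String) : List String :=
  parseButtonsA sequence.toList

-- ===== PORT B =====
-- Source B: parts = sequence.split("+/-"); tokens = list(parts[0]); for part in parts[1:]: append "+/-", extend part
def parse_button_sequence_alt (sequence : String) : List String :=
  match PySem.Str.split? sequence "+/-" with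
  | none => []  -- unreachable: the separator "+/-" is nonempty
  | some parts =>
    match parts with
    | [] => []  -- unreachable: split always returns at least one piece
    | p0 :: rest =>
      rest.foldl (fun toks part => (toks ++ ["+/-"]) ++ part.toList.map (fun c => c.toString))
        (p0.toList.map (fun c => c.toString))

-- ===== PRECONDITION & SPEC =====
def Spec_parse_button_sequence (sequence : String) (out : List String) : Prop := out = parse_button_sequence_alt sequence
instance (sequence : String) (out : List String) : Decidable (Spec_parse_button_sequence sequence out) := by unfold Spec_parse_button_sequence; infer_instance

-- ===== CLAIM (what is proved, stated in full; the proofs are below) =====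
def Claim_equal_parse_button_sequence : Prop := ∀ (sequence : String), Dom_parse_button_sequence sequence → Spec_parse_button_sequence sequence (parse_button_sequence sequence)

-- ===== LEMMAS AND PROOFS =====

-- Reference splitter mirroring PySem.Chars.splitOn.go's recursion (cur is the reversed current piece)
def pvSplitPM (cur : List Char) (l : List Char) : List (List Char) :=
  match l with
  | [] => [cur.reverse]
  | c :: rest =>
    if ['+', '/', '-'].isPrefixOf (c :: rest) then
      cur.reverse :: pvSplitPM [] ((c :: rest).drop 3)
    else
      pvSplitPM (c :: cur) rest
termination_by l.length
decreasing_by all_goals simp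

def pvExpandTail (ps : List (List Char)) : List String :=
  ps.flatMap (fun q => "+/-" :: q.map (fun c => c.toString))

def pvExpand : List (List Char) → List String
  | [] => []
  | p :: ps => p.map (fun c => c.toString) ++ pvExpandTail ps

lemma pvSplitPM_ne_nil (cur l : List Char) : pvSplitPM cur l ≠ [] := by
  induction cur, l using pvSplitPM.induct with
  | case1 cur => simp [pvSplitPM]
  | case2 cur c rest h ih => rw [pvSplitPM]; simp [h]
  | case3 cur c rest h ih => rw [pvSplitPM]; simp [h]; exact ih

lemma pvExpandTail_eq (ps : List (List Char)) (h : ps ≠ []) :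
    pvExpandTail ps = "+/-" :: pvExpand ps := by
  cases ps with
  | nil => exact absurd rfl h
  | cons q qs => simp [pvExpandTail, pvExpand]

lemma pvGo_spec (fuel : Nat) (l cur : List Char) (acc : List (List Char))
    (hf : l.length < fuel) :
    PySem.Chars.splitOn.go ['+', '/', '-'] fuel l cur acc = acc.reverse ++ pvSplitPM cur l := by
  induction fuel generalizing l cur acc with
  | zero => omega
  | succ n ih =>
    cases l with
    | nil => simp [PySem.Chars.splitOn.go, pvSplitPM]
    | cons c rest =>
      rw [PySem.Chars.splitOn.go, pvSplitPM]
      simp only [List.length_cons] at hf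
      split_ifs with h
      · have h3 : (['+', '/', '-'] : List Char).length = 3 := rfl
        rw [h3, ih ((c :: rest).drop 3) [] (cur.reverse :: acc) (by simp; omega)]
        simp
      · rw [ih rest (c :: cur) acc (by omega)]

lemma pvSlice03 (xs : List Char) : PySem.List.slice xs (some 0) (some 3) = xs.take 3 := by
  simp [PySem.List.slice, PySem.List.clampIdx]

lemma pvPrefPM (xs : List Char) :
    (xs.take 3 = ['+', '/', '-']) ↔ (['+', '/', '-'].isPrefixOf xs = true) := by
  rw [List.isPrefixOf_iff_prefix, List.prefix_iff_eq_take]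
  constructor <;> intro h <;> simp_all

lemma pvExpand_splitPM (cur l : List Char) :
    pvExpand (pvSplitPM cur l) = cur.reverse.map (fun c => c.toString) ++ parseButtonsA l := by
  induction cur, l using pvSplitPM.induct with
  | case1 cur => simp [pvSplitPM, parseButtonsA, pvExpand, pvExpandTail]
  | case2 cur c rest h ih =>
    rw [pvSplitPM, parseButtonsA, pvSlice03]
    rw [if_pos h, if_pos ((pvPrefPM (c :: rest)).2 h)]
    simp only [pvExpand]
    rw [pvExpandTail_eq _ (pvSplitPM_ne_nil _ _), ih]
    simp
  | case3 cur c rest h ih =>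
    rw [pvSplitPM, parseButtonsA, pvSlice03]
    rw [if_neg h, if_neg (fun hc => h ((pvPrefPM (c :: rest)).1 hc))]
    rw [ih]
    simp

lemma pvAlt_eq (s : String) :
    parse_button_sequence_alt s = pvExpand (pvSplitPM [] s.toList) := by
  unfold parse_button_sequence_alt
  have hsplit : PySem.Str.split? s "+/-" =
      some ((pvSplitPM [] s.toList).map String.ofList) := by
    simp only [PySem.Str.split?, PySem.Chars.split?]
    have : ("+/-" : String).toList = ['+', '/', '-'] := rfl
    rw [this]
    simp only [List.isEmpty_cons, if_neg (by decide : ¬ (false = true))]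
    rw [PySem.Chars.splitOn, pvGo_spec _ _ _ _ (by omega)]
    simp
  rw [hsplit]
  cases hps : pvSplitPM [] s.toList with
  | nil => exact absurd hps (pvSplitPM_ne_nil _ _)
  | cons p0 rest =>
    simp only [List.map_cons]
    rw [List.foldl_map]
    rw [List.foldl_ext _ (fun toks q => toks ++ ("+/-" :: q.map (fun c => c.toString)))
      _ (fun toks q _ => by simp)]
    rw [PySem.List.foldl_append_eq_flatMap]
    simp [pvExpand, pvExpandTail]

theorem parse_button_sequence_spec : Claim_equal_parse_button_sequence := by
  intro s _
  show parse_button_sequence s = parse_button_sequence_alt s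
  rw [pvAlt_eq, pvExpand_splitPM]
  simp [parse_button_sequence]
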